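-- pv_equiv track=rewrite | github.com/Clear-Match-Talent/candidate-triage-system | filtering/evaluator.py | _bucket_from_evaluations
-- ===== SOURCE A (Python) =====
-- from typing import Any, Dict, List, Optional
--
-- def _bucket_from_evaluations(
--     must_haves: List[Dict[str, str]],
--     gating_params: List[Dict[str, str]],
--     nice_to_haves: List[Dict[str, str]],
-- ) -> str:
--     all_evals = must_haves + gating_params + nice_to_haves
--     if all_evals and all(e.get("status") == "Unsure" for e in all_evals):
--         return "Unable to Enrich"
--
--     if any(e.get("status") == "Fail" for e in gating_params):
--         return "Dismiss"
--
--     if any(e.get("status") == "Fail" for e in must_haves):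
--         return "Dismiss"
--
--     if must_haves and all(e.get("status") == "Pass" for e in must_haves):
--         return "Proceed"
--
--     if any(e.get("status") == "Unsure" for e in must_haves):
--         return "Human Review"
--
--     return "Human Review"
-- ===== SOURCE B (Python) =====
-- from typing import Any, Dict, List, Optional
--
-- def _bucket_from_evaluations(
--     must_haves: List[Dict[str, str]],
--     gating_params: List[Dict[str, str]],
--     nice_to_haves: List[Dict[str, str]],
-- ) -> str:
--     # One fused left fold over all evaluations, tagged with their group's role,
--     # accumulating a 4-field state; the bucket is decided once from the final state.
--     def step(state, status, is_must, is_core):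
--         total, non_unsure, core_fail, must_pass = state
--         return (
--             total + 1,
--             non_unsure + (status != "Unsure"),
--             core_fail + (is_core and status == "Fail"),
--             must_pass + (is_must and status == "Pass"),
--         )
--
--     state = (0, 0, 0, 0)
--     for e in must_haves:
--         state = step(state, e.get("status"), True, True)
--     for e in gating_params:
--         state = step(state, e.get("status"), False, True)
--     for e in nice_to_haves:
--         state = step(state, e.get("status"), False, False)
--
--     total, non_unsure, core_fail, must_pass = state
--     if total > 0 and non_unsure == 0:
--         return "Unable to Enrich"
--     if core_fail > 0:
--         return "Dismiss"
--     if must_haves and must_pass == len(must_haves):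
--         return "Proceed"
--     return "Human Review"
-- ===== Notes on version B (the rewrite author's own statement) =====
-- stated objective: alternative
-- what changed: Replaces A's five independent short-circuiting any/all scans over (re-)concatenated lists with one fused left fold over all evaluations accumulating a 4-field state (total, non-Unsure count, core-fail count, must-pass count), from which the bucket is decided once at the end.
import Mathlib
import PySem

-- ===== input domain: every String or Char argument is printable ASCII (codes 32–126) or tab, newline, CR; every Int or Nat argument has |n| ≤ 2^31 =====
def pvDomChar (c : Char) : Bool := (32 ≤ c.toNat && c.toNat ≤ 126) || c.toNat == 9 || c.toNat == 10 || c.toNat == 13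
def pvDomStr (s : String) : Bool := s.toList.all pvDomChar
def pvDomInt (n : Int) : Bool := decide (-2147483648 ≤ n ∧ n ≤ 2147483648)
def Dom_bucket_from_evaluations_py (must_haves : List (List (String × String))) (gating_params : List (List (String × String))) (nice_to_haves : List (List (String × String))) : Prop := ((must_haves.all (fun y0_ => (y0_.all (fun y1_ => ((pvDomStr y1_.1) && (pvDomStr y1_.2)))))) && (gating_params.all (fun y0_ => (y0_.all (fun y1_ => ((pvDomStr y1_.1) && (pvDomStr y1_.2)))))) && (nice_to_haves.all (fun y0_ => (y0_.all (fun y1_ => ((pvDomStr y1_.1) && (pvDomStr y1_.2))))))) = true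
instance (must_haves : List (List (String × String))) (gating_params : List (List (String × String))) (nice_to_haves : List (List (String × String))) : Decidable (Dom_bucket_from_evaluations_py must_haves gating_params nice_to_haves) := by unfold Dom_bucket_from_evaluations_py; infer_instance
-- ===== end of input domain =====

-- B replaces A's five independent any/all scans over (re-)concatenated lists with one fused left
-- fold over all evaluations accumulating a 4-field state (total, non-Unsure, core-fail, must-pass),
-- deciding the bucket once from the final state (objective: alternative).

-- ===== PORT A =====
-- e.get("status"): first-match lookup in the association list (exact for a Python dict)
def pyGetStatus (e : List (String × String)) : Option String :=
  (PySem.Dict.mk e).get? "status"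

def bucket_from_evaluations_py (must_haves : List (List (String × String))) (gating_params : List (List (String × String))) (nice_to_haves : List (List (String × String))) : String :=
  let all_evals := must_haves ++ gating_params ++ nice_to_haves
  if !all_evals.isEmpty && all_evals.all (fun e => pyGetStatus e == some "Unsure") then
    "Unable to Enrich"
  else if gating_params.any (fun e => pyGetStatus e == some "Fail") then
    "Dismiss"
  else if must_haves.any (fun e => pyGetStatus e == some "Fail") then
    "Dismiss"
  else if !must_haves.isEmpty && must_haves.all (fun e => pyGetStatus e == some "Pass") then
    "Proceed"
  else if must_haves.any (fun e => pyGetStatus e == some "Unsure") then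
    "Human Review"
  else
    "Human Review"

-- ===== PORT B =====
-- step(state, status, is_must, is_core) from Source B
def pvStep (isMust isCore : Bool) (st : Int × Int × Int × Int) (s : Option String) : Int × Int × Int × Int :=
  (st.1 + 1,
   st.2.1 + (if s ≠ some "Unsure" then 1 else 0),
   st.2.2.1 + (if isCore = true ∧ s = some "Fail" then 1 else 0),
   st.2.2.2 + (if isMust = true ∧ s = some "Pass" then 1 else 0))

def bucket_from_evaluations_py_alt (must_haves : List (List (String × String))) (gating_params : List (List (String × String))) (nice_to_haves : List (List (String × String))) : String :=
  let st0 : Int × Int × Int × Int := (0, 0, 0, 0)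
  let st1 := must_haves.foldl (fun st e => pvStep true true st (pyGetStatus e)) st0
  let st2 := gating_params.foldl (fun st e => pvStep false true st (pyGetStatus e)) st1
  let st3 := nice_to_haves.foldl (fun st e => pvStep false false st (pyGetStatus e)) st2
  if 0 < st3.1 ∧ st3.2.1 = 0 then
    "Unable to Enrich"
  else if 0 < st3.2.2.1 then
    "Dismiss"
  else if ¬ must_haves.isEmpty = true ∧ st3.2.2.2 = (must_haves.length : Int) then
    "Proceed"
  else
    "Human Review"

-- ===== PRECONDITION & SPEC =====
def Spec_bucket_from_evaluations_py (must_haves : List (List (String × String))) (gating_params : List (List (String × String))) (nice_to_haves : List (List (String × String))) (out : String) : Prop := out = bucket_from_evaluations_py_alt must_haves gating_params nice_to_haves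
instance (must_haves : List (List (String × String))) (gating_params : List (List (String × String))) (nice_to_haves : List (List (String × String))) (out : String) : Decidable (Spec_bucket_from_evaluations_py must_haves gating_params nice_to_haves out) := by unfold Spec_bucket_from_evaluations_py; infer_instance

-- ===== CLAIM (what is proved, stated in full; the proofs are below) =====
def Claim_equal_bucket_from_evaluations_py : Prop := ∀ (must_haves : List (List (String × String))) (gating_params : List (List (String × String))) (nice_to_haves : List (List (String × String))), Dom_bucket_from_evaluations_py must_haves gating_params nice_to_haves → Spec_bucket_from_evaluations_py must_haves gating_params nice_to_haves (bucket_from_evaluations_py must_haves gating_params nice_to_haves)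

-- ===== LEMMAS AND PROOFS =====

-- the fused fold computes (total, non-Unsure count, conditional Fail count, conditional Pass count)
theorem pvFoldChar (bM bC : Bool) (l : List (List (String × String))) (st : Int × Int × Int × Int) :
    l.foldl (fun st e => pvStep bM bC st (pyGetStatus e)) st =
    (st.1 + l.length,
     st.2.1 + (l.countP (fun e => !(pyGetStatus e == some "Unsure")) : Int),
     st.2.2.1 + (if bC then (l.countP (fun e => pyGetStatus e == some "Fail") : Int) else 0),
     st.2.2.2 + (if bM then (l.countP (fun e => pyGetStatus e == some "Pass") : Int) else 0)) := by
  induction l generalizing st with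
  | nil => simp
  | cons h t ih =>
    rw [List.foldl_cons, ih]
    obtain ⟨a, b, c, d⟩ := st
    simp only [pvStep, List.countP_cons, List.length_cons]
    refine Prod.ext ?_ (Prod.ext ?_ (Prod.ext ?_ ?_)) <;> simp <;> (try split_ifs) <;> simp_all <;> omega

theorem pvAnyIffCountP (l : List (List (String × String))) (s : String) :
    (l.any (fun e => pyGetStatus e == some s) = true) ↔
      0 < l.countP (fun e => pyGetStatus e == some s) := by
  rw [List.countP_pos_iff, List.any_eq_true]

theorem pvAllIffCountP (l : List (List (String × String))) (s : String) :
    (l.all (fun e => pyGetStatus e == some s) = true) ↔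
      l.countP (fun e => pyGetStatus e == some s) = l.length := by
  rw [List.countP_eq_length, List.all_eq_true]

theorem pvSplit (l : List (List (String × String))) :
    l.countP (fun e => pyGetStatus e == some "Unsure")
      + l.countP (fun e => !(pyGetStatus e == some "Unsure")) = l.length := by
  induction l with
  | nil => simp
  | cons h t ih =>
    simp only [List.countP_cons, List.length_cons]
    by_cases hc : (pyGetStatus h == some "Unsure") = true <;> simp [hc] <;> omega

theorem pvIsEmptyIff (l : List (List (String × String))) :
    l.isEmpty = true ↔ l.length = 0 := by
  simp [List.isEmpty_iff, List.length_eq_zero_iff]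

theorem pvIsEmptyFalseIff (l : List (List (String × String))) :
    l.isEmpty = false ↔ ¬ l.length = 0 := by
  rw [← Bool.not_eq_true, pvIsEmptyIff]

-- ===== VERDICT (by name: the statement is the Claim_ definition above) =====
theorem bucket_from_evaluations_py_spec : Claim_equal_bucket_from_evaluations_py := by
  intro m g n _
  unfold Spec_bucket_from_evaluations_py
  unfold bucket_from_evaluations_py bucket_from_evaluations_py_alt
  have b1 := List.countP_le_length (p := fun e => pyGetStatus e == some "Fail") (l := m)
  have b2 := List.countP_le_length (p := fun e => pyGetStatus e == some "Fail") (l := g)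
  have b3 := List.countP_le_length (p := fun e => pyGetStatus e == some "Pass") (l := m)
  have b4 := List.countP_le_length (p := fun e => !(pyGetStatus e == some "Unsure")) (l := m)
  have b5 := List.countP_le_length (p := fun e => !(pyGetStatus e == some "Unsure")) (l := g)
  have b6 := List.countP_le_length (p := fun e => !(pyGetStatus e == some "Unsure")) (l := n)
  have r1 : m.countP (fun e => pyGetStatus e == some "Fail")
      ≤ m.countP (fun e => !(pyGetStatus e == some "Unsure")) := by
    apply List.countP_mono_left; intro e _ h; simp only [beq_iff_eq] at h; simp [h]
  have r2 : g.countP (fun e => pyGetStatus e == some "Fail")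
      ≤ g.countP (fun e => !(pyGetStatus e == some "Unsure")) := by
    apply List.countP_mono_left; intro e _ h; simp only [beq_iff_eq] at h; simp [h]
  have r3 : m.countP (fun e => pyGetStatus e == some "Pass")
      ≤ m.countP (fun e => !(pyGetStatus e == some "Unsure")) := by
    apply List.countP_mono_left; intro e _ h; simp only [beq_iff_eq] at h; simp [h]
  have s1 := pvSplit m
  have s2 := pvSplit g
  have s3 := pvSplit n
  simp only [pvFoldChar, if_true]
  split_ifs <;> first
    | rfl
    | (simp only [Bool.and_eq_true, Bool.not_eq_true', List.all_append,
        pvIsEmptyIff, pvIsEmptyFalseIff, not_and, pvAnyIffCountP, pvAllIffCountP,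
        List.length_append] at * <;> omega)
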